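-- pv_equiv track=rewrite | github.com/printjin-gmailcom/2024--Code_States-SSU-Coding_Test | image18.py | solution
-- ===== SOURCE A (Python) =====
-- def solution(levels):
--     answer = [0, 0]
--
--     lev_cnt = {}
--     for lev in levels:
--         if lev not in lev_cnt:
--             lev_cnt[lev] = 0
--         lev_cnt[lev] += 1
--
--     max_level = max(lev_cnt.keys())
--
--     for lev in range(1, 1+max_level):
--         if lev not in lev_cnt:
--             lev_cnt[lev] = 0
--
--         node_limit = 2**(lev-1)
--
--         if lev_cnt[lev] > node_limit:
--             answer[0] += lev_cnt[lev] - node_limit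
--             lev_cnt[lev] = node_limit
--
--     for lev in range(max_level, 0, -1):
--         if lev not in lev_cnt:
--             lev_cnt[lev] = 0
--
--         if lev+1 not in lev_cnt:
--             children = 0
--         else:
--             children = lev_cnt[lev+1]
--
--         node_needed = (children+1) // 2
--
--         if node_needed > lev_cnt[lev]:
--             answer[1] += node_needed - lev_cnt[lev]
--             lev_cnt[lev] = node_needed
--
--     return answer
-- ===== SOURCE B (Python) =====
-- def _cascade(v, g):
--     # (sum_{i=1..g} ceil(v/2**i), ceil(v/2**g)) for v >= 0; a non-positive g means no gap
--     if g <= 0: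
--         return 0, v
--     if v <= 1:
--         return g * v, v
--     w = (v + 1) // 2
--     s, c = _cascade(w, g - 1)
--     return w + s, c
--
--
-- def solution(levels):
--     cnt = {}
--     for lev in levels:
--         cnt[lev] = cnt.get(lev, 0) + 1
--     removed = 0
--     added = 0
--     carry = 0                 # required node count at level `at`
--     at = max(cnt) + 1
--     for l in sorted((k for k in cnt if k >= 1), reverse=True):
--         s, carry = _cascade(carry, at - 1 - l)   # empty levels between `at` and l
--         added += s
--         need = (carry + 1) // 2
--         have = min(cnt[l], 2 ** (l - 1))
--         removed += cnt[l] - have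
--         if need > have:
--             added += need - have
--             carry = need
--         else:
--             carry = have
--         at = l
--     s, _ = _cascade(carry, at - 1)               # empty levels below the lowest present one
--     return [removed, added + s]
-- ===== Notes on version B (the rewrite author's own statement) =====
-- stated objective: faster
-- what changed: Instead of A's two dict-mutating sweeps over every level 1..max(levels), B iterates only the distinct present levels in one sorted descending pass and sums each run of empty levels with a logarithmic halving cascade (the per-gap requirement sum ceil(v/2^i) stabilises at v<=1).
import Mathlib
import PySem

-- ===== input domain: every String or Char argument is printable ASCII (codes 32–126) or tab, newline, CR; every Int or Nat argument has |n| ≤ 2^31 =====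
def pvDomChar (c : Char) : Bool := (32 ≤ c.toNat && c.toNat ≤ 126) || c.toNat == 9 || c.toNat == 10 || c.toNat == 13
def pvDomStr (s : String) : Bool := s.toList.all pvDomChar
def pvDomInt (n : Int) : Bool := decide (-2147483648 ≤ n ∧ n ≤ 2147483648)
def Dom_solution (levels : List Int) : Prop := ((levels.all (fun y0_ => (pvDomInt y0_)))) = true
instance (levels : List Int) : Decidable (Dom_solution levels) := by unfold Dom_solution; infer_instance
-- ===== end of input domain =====

-- B iterates only the distinct levels actually present (sorted descending) and sums each
-- run of empty levels between them in one O(log) cascade, instead of A's per-level walk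
-- over every level 1..max with a mutated dict: objective = faster (asymptotic).

-- ===== PORT A =====
-- 2**(lev-1) is ported as 2 ^ (lev-1).toNat — exact, since the loop only visits lev ≥ 1.
def solution (levels : List Int) : List Int :=
  let cnt := levels.foldl
    (fun d lev =>
      let d := if d.contains lev then d else d.insert lev (0 : Int)
      d.insert lev (d.getD lev 0 + 1))
    PySem.Dict.empty
  match PySem.List.max? cnt.keys (fun k => k) with
  | none => []      -- Python raises ValueError here (empty levels); excluded by Pre_
  | some max_level =>
    let s1 := (PySem.List.pyRange 1 (1 + max_level) 1).foldl
      (fun (st : Int × PySem.Dict Int Int) lev =>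
        let a0 := st.1
        let d := if st.2.contains lev then st.2 else st.2.insert lev 0
        let node_limit : Int := 2 ^ (lev - 1).toNat
        if d.getD lev 0 > node_limit then
          (a0 + (d.getD lev 0 - node_limit), d.insert lev node_limit)
        else (a0, d))
      (0, cnt)
    let s2 := (PySem.List.pyRange max_level 0 (-1)).foldl
      (fun (st : Int × PySem.Dict Int Int) lev =>
        let a1 := st.1
        let d := if st.2.contains lev then st.2 else st.2.insert lev 0
        let children : Int := if d.contains (lev + 1) = false then 0 else d.getD (lev + 1) 0
        let node_needed := PySem.Int.floordiv (children + 1) 2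
        if node_needed > d.getD lev 0 then
          (a1 + (node_needed - d.getD lev 0), d.insert lev node_needed)
        else (a1, d))
      (0, s1.2)
    [s1.1, s2.1]

-- ===== PORT B =====
-- _cascade(v, g): (sum of ceil(v/2^i) for i = 1..g, ceil(v/2^g)); g ≤ 0 means no gap.
def cascade (v g : Int) : Int × Int :=
  if g ≤ 0 then (0, v)
  else if v ≤ 1 then (g * v, v)
  else
    let w := PySem.Int.floordiv (v + 1) 2
    let p := cascade w (g - 1)
    (w + p.1, p.2)
termination_by g.toNat
decreasing_by omega

-- 2**(l-1) is ported as 2 ^ (l-1).toNat — exact, since the loop only visits l ≥ 1.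
def solution_alt (levels : List Int) : List Int :=
  let cnt := levels.foldl (fun d lev => d.insert lev (d.getD lev 0 + 1)) PySem.Dict.empty
  match PySem.List.max? cnt.keys (fun k => k) with
  | none => []      -- Python raises ValueError here (empty levels); excluded by Pre_
  | some mx =>
    let st := (PySem.List.sorted (cnt.keys.filter (fun k => k ≥ 1)) (fun k => k) true).foldl
      (fun (st : Int × Int × Int × Int) l =>
        let removed := st.1
        let added := st.2.1
        let p := cascade st.2.2.1 (st.2.2.2 - 1 - l)
        let added := added + p.1
        let carry := p.2
        let need := PySem.Int.floordiv (carry + 1) 2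
        let hav := min (cnt.getD l 0) (2 ^ (l - 1).toNat)
        let removed := removed + (cnt.getD l 0 - hav)
        if need > hav then (removed, added + (need - hav), need, l)
        else (removed, added, hav, l))
      (0, 0, 0, mx + 1)
    let q := cascade st.2.2.1 (st.2.2.2 - 1)
    [st.1, st.2.1 + q.1]

-- ===== PRECONDITION & SPEC =====
-- Pre_ excludes only the empty list, on which A raises ValueError (max() of an empty dict).
def Pre_solution (levels : List Int) : Prop := levels ≠ []
instance (levels : List Int) : Decidable (Pre_solution levels) := by unfold Pre_solution; infer_instance
def pvWitness_solution : List Int := [2, 2, 2, 5]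

def Spec_solution (levels : List Int) (out : List Int) : Prop := out = solution_alt levels
instance (levels : List Int) (out : List Int) : Decidable (Spec_solution levels out) := by unfold Spec_solution; infer_instance

-- ===== CLAIM (what is proved, stated in full; the proofs are below) =====
def Claim_equal_solution : Prop := ∀ (levels : List Int), Dom_solution levels → Pre_solution levels → Spec_solution levels (solution levels)

-- ===== LEMMAS AND PROOFS =====

-- ceiling half, the "parent requirement" of v children
def ceilHalf (v : Int) : Int := (v + 1) / 2

-- reference cascade: one ceiling-halving per level, Nat fuel
def hcasc (v : Int) : Nat → Int × Int
  | 0 => (0, v)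
  | g + 1 =>
    let w := ceilHalf v
    let p := hcasc w g
    (w + p.1, p.2)

-- reference model: go cnt k carry processes levels k, k-1, …, 1, where carry is the
-- (already capped+cascaded) node requirement at level k+1; returns (removed, added)
def go (cnt : Int → Int) : Nat → Int → Int × Int
  | 0, _ => (0, 0)
  | k + 1, carry =>
    let need := ceilHalf carry
    let hav := min (cnt ((k : Int) + 1)) (2 ^ k)
    let p := go cnt k (max hav need)
    (max 0 (cnt ((k : Int) + 1) - 2 ^ k) + p.1, max 0 (need - hav) + p.2)

theorem ceilHalf_nonneg {v : Int} (h : 0 ≤ v) : 0 ≤ ceilHalf v := by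
  unfold ceilHalf; positivity

theorem hcasc_snd_nonneg {v : Int} (h : 0 ≤ v) (g : Nat) : 0 ≤ (hcasc v g).2 := by
  induction g generalizing v with
  | zero => simpa [hcasc]
  | succ g ih => simpa only [hcasc] using ih (ceilHalf_nonneg h)

theorem hcasc_small {v : Int} (h0 : 0 ≤ v) (h1 : v ≤ 1) (g : Nat) :
    hcasc v g = ((g : Int) * v, v) := by
  have hv : ceilHalf v = v := by unfold ceilHalf; omega
  induction g with
  | zero => simp [hcasc]
  | succ g ih =>
    simp only [hcasc, ih, hv, Prod.mk.injEq]
    refine ⟨by push_cast; ring, by simp⟩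

theorem cascade_eq {v : Int} (hv : 0 ≤ v) (g : Int) : cascade v g = hcasc v g.toNat := by
  induction hn : g.toNat generalizing v g with
  | zero =>
    have hg : g ≤ 0 := by omega
    rw [cascade]; simp [hg, hcasc]
  | succ n ih =>
    have hg : ¬ g ≤ 0 := by omega
    rw [cascade]
    simp only [hg, if_false]
    by_cases hsm : v ≤ 1
    · simp only [hsm, if_true]
      rw [hcasc_small hv hsm]
      have : ((g.toNat : Int)) = g := by omega
      rw [hn] at this; rw [← this]
    · simp only [hsm, if_false]
      have hfd : PySem.Int.floordiv (v + 1) 2 = ceilHalf v := by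
        rw [PySem.Int.floordiv_eq_ediv_of_pos (by omega)]; rfl
      have ih' := ih (ceilHalf_nonneg hv) (g := g - 1) (by omega)
      simp only [hfd, ih', hcasc]

-- A's counter loop (setdefault-then-increment) is the standard counter
theorem counter_step_eq (d : PySem.Dict Int Int) (lev : Int) :
    (let d' := if d.contains lev then d else d.insert lev (0 : Int)
     d'.insert lev (d'.getD lev 0 + 1)) = d.insert lev (d.getD lev 0 + 1) := by
  by_cases h : d.contains lev
  · simp [h]
  · simp only [eq_false_of_ne_true h, Bool.false_eq_true, if_false]
    rw [PySem.Dict.getD_insert_self, PySem.Dict.insert_insert_self,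
        PySem.Dict.getD_of_not_contains d 0 (eq_false_of_ne_true h)]

theorem cnt_eq_counter (levels : List Int) :
    levels.foldl
      (fun d lev =>
        let d := if d.contains lev then d else d.insert lev (0 : Int)
        d.insert lev (d.getD lev 0 + 1))
      PySem.Dict.empty = PySem.Dict.counter levels := by
  exact (PySem.List.foldl_congr_mem levels _
      (fun d lev => d.insert lev (d.getD lev 0 + 1)) PySem.Dict.empty
      (fun d x _ => counter_step_eq d x)).trans
    (PySem.Dict.foldl_insert_getD_add_one_eq_counter levels)

-- removed is independent of the carry
theorem go_fst_carry (cnt : Int → Int) (k : Nat) (c c' : Int) :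
    (go cnt k c).1 = (go cnt k c').1 := by
  induction k generalizing c c' with
  | zero => rfl
  | succ k ih => simp only [go]; rw [ih]

-- an all-empty suffix of levels: nothing removed, every cascaded requirement added
theorem go_empty (cnt : Int → Int) (k : Nat)
    (h : ∀ l : Int, 1 ≤ l → l ≤ (k : Int) → cnt l = 0) {carry : Int} (hc : 0 ≤ carry) :
    go cnt k carry = (0, (hcasc carry k).1) := by
  induction k generalizing carry with
  | zero => simp [go, hcasc]
  | succ k ih =>
    have hck : cnt ((k : Int) + 1) = 0 := h _ (by omega) (by push_cast; omega)
    have hneed := ceilHalf_nonneg hc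
    have hp : (0 : Int) < 2 ^ k := by positivity
    have hmin0 : min (0 : Int) (2 ^ k) = 0 := min_eq_left (le_of_lt hp)
    have ihs := ih (fun l h1 h2 => h l h1 (by push_cast at h2 ⊢; omega)) hneed
    simp only [go, hck, hcasc]
    rw [hmin0, max_eq_right hneed, ihs]
    rw [Prod.ext_iff]
    have e1 : max (0 : Int) (0 - 2 ^ k) = 0 := max_eq_left (by linarith)
    have e2 : max (0 : Int) (ceilHalf carry - 0) = ceilHalf carry := by
      rw [sub_zero]; exact max_eq_right hneed
    rw [e1, e2]
    exact ⟨by ring, by ring⟩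

-- skip a gap of g empty levels at the top: closed cascade + the rest
theorem go_split (cnt : Int → Int) (j g : Nat) (hg : g ≤ j)
    (h : ∀ l : Int, (j : Int) - g < l → l ≤ (j : Int) → cnt l = 0)
    {carry : Int} (hc : 0 ≤ carry) :
    go cnt j carry =
      ((go cnt (j - g) (hcasc carry g).2).1,
        (hcasc carry g).1 + (go cnt (j - g) (hcasc carry g).2).2) := by
  induction g generalizing j carry with
  | zero => simp [hcasc]
  | succ g ih =>
    obtain ⟨j', rfl⟩ : ∃ j', j = j' + 1 := ⟨j - 1, by omega⟩
    have hck : cnt ((j' : Int) + 1) = 0 := h _ (by push_cast; omega) (by push_cast; omega)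
    have hneed := ceilHalf_nonneg hc
    have hp : (0 : Int) < 2 ^ j' := by positivity
    have hmin0 : min (0 : Int) (2 ^ j') = 0 := min_eq_left (le_of_lt hp)
    have ihs := ih j' (by omega) (fun l h1 h2 => h l (by push_cast at h1 ⊢; omega)
      (by push_cast at h2 ⊢; omega)) hneed
    simp only [go, hck, hcasc]
    rw [hmin0, max_eq_right hneed, ihs]
    have hjj : j' + 1 - (g + 1) = j' - g := by omega
    rw [hjj, Prod.ext_iff]
    have e1 : max (0 : Int) (0 - 2 ^ j') = 0 := max_eq_left (by linarith)
    have e2 : max (0 : Int) (ceilHalf carry - 0) = ceilHalf carry := by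
      rw [sub_zero]; exact max_eq_right hneed
    rw [e1, e2]
    exact ⟨by ring, by ring⟩

-- ===== A-side: the two range loops compute the model =====

theorem go_fst_succ (cnt : Int → Int) (n : Nat) (c : Int) :
    (go cnt (n + 1) c).1 = (go cnt n 0).1 + max 0 (cnt ((n : Int) + 1) - 2 ^ n) := by
  simp only [go]
  rw [go_fst_carry cnt n _ 0]
  ring

-- invariant after A's first (capping) loop over levels 1..n
theorem loopA1 (levels : List Int) (n : Nat) :
    ∃ d : PySem.Dict Int Int,
      (PySem.List.pyRange 1 (1 + (n : Int)) 1).foldl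
        (fun (st : Int × PySem.Dict Int Int) lev =>
          let a0 := st.1
          let d := if st.2.contains lev then st.2 else st.2.insert lev 0
          let node_limit : Int := 2 ^ (lev - 1).toNat
          if d.getD lev 0 > node_limit then
            (a0 + (d.getD lev 0 - node_limit), d.insert lev node_limit)
          else (a0, d))
        (0, PySem.Dict.counter levels)
      = ((go (fun l => (levels.count l : Int)) n 0).1, d) ∧
      (∀ l : Int, d.getD l 0 =
        if 1 ≤ l ∧ l ≤ (n : Int) then min (levels.count l : Int) (2 ^ (l - 1).toNat)
        else (levels.count l : Int)) ∧
      (∀ l : Int, d.contains l = true ↔ (l ∈ levels ∨ (1 ≤ l ∧ l ≤ (n : Int)))) := by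
  induction n with
  | zero =>
    refine ⟨PySem.Dict.counter levels, ?_, ?_, ?_⟩
    · rw [PySem.List.pyRange_one_eq_nil (by norm_num)]
      simp [go]
    · intro l
      have hno : ¬ (1 ≤ l ∧ l ≤ ((0 : Nat) : Int)) := by push_cast; omega
      rw [if_neg hno, PySem.Dict.getD_counter]
    · intro l
      rw [PySem.Dict.contains_iff_mem_keys, PySem.Dict.keys_counter, PySem.Set.mem_ofList]
      constructor
      · exact Or.inl
      · rintro (h | h)
        · exact h
        · push_cast at h; omega
  | succ n ih =>
    obtain ⟨d, hfold, hP1, hP2⟩ := ih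
    have hcast : (1 + ((n + 1 : Nat) : Int)) = (1 + (n : Int)) + 1 := by push_cast; ring
    have hrange : PySem.List.pyRange 1 (1 + ((n + 1 : Nat) : Int)) 1
        = PySem.List.pyRange 1 (1 + (n : Int)) 1 ++ [1 + (n : Int)] := by
      rw [hcast]; exact PySem.List.pyRange_one_succ_right (by omega)
    rw [hrange, List.foldl_append, hfold]
    have hlt : (1 + (n : Int) - 1).toNat = n := by omega
    have hgd : d.getD (1 + (n : Int)) 0 = (levels.count (1 + (n : Int)) : Int) := by
      have := hP1 (1 + (n : Int))
      rwa [if_neg (by omega)] at this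
    have hpow : (0 : Int) < 2 ^ n := by positivity
    have hP2' : ∀ l : Int, (d.contains l = true ∨ l = 1 + (n : Int)) ↔
        (l ∈ levels ∨ (1 ≤ l ∧ l ≤ ((n + 1 : Nat) : Int))) := by
      intro l
      constructor
      · rintro (h | h)
        · rcases (hP2 l).mp h with h' | h'
          · exact Or.inl h'
          · exact Or.inr ⟨h'.1, by push_cast; omega⟩
        · exact Or.inr ⟨by omega, by push_cast; omega⟩
      · rintro (h | h)
        · exact Or.inl ((hP2 l).mpr (Or.inl h))
        · by_cases he : l = 1 + (n : Int)
          · exact Or.inr he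
          · exact Or.inl ((hP2 l).mpr (Or.inr ⟨h.1, by push_cast at h; omega⟩))
    by_cases hcl : d.contains (1 + (n : Int)) = true
    · by_cases hbig : d.getD (1 + (n : Int)) 0 > 2 ^ n
      · refine ⟨d.insert (1 + (n : Int)) (2 ^ n), ?_, ?_, ?_⟩
        · simp only [List.foldl_cons, List.foldl_nil, hcl, if_true, hlt, hbig]
          rw [go_fst_succ, show ((n : Int) + 1) = 1 + (n : Int) from by ring,
            Prod.ext_iff]
          refine ⟨?_, rfl⟩
          rw [hgd] at hbig
          rw [hgd, max_eq_right (by omega)]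
        · intro l
          rw [PySem.Dict.getD_insert]
          by_cases hl : l = 1 + (n : Int)
          · rw [hgd] at hbig
            rw [if_pos hl, if_pos (by rw [hl]; push_cast; omega)]
            rw [hl, hlt, min_eq_right (by omega)]
          · rw [if_neg hl, hP1 l]
            by_cases hll : 1 ≤ l ∧ l ≤ (n : Int)
            · rw [if_pos hll, if_pos (by push_cast; omega)]
            · rw [if_neg hll, if_neg (by push_cast; omega)]
        · intro l
          rw [PySem.Dict.contains_insert, Bool.or_eq_true, beq_iff_eq, ← hP2' l]
          tauto
      · refine ⟨d, ?_, ?_, ?_⟩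
        · simp only [List.foldl_cons, List.foldl_nil, hcl, if_true, hlt]
          rw [if_neg hbig, go_fst_succ, show ((n : Int) + 1) = 1 + (n : Int) from by ring,
            Prod.ext_iff]
          refine ⟨?_, rfl⟩
          rw [hgd] at hbig
          rw [max_eq_left (by omega)]
          ring
        · intro l
          rw [hP1 l]
          by_cases hl : l = 1 + (n : Int)
          · rw [hgd] at hbig
            rw [if_neg (by rw [hl]; omega), if_pos (by rw [hl]; push_cast; omega), hl, hlt]
            exact (min_eq_left (by omega)).symm
          · by_cases hll : 1 ≤ l ∧ l ≤ (n : Int)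
            · rw [if_pos hll, if_pos (by push_cast; omega)]
            · rw [if_neg hll, if_neg (by push_cast; omega)]
        · intro l
          rw [← hP2' l]
          constructor
          · exact Or.inl
          · rintro (h | h)
            · exact h
            · rw [h]; exact hcl
    · have hmem : (1 + (n : Int)) ∉ levels := fun hm => hcl ((hP2 _).mpr (Or.inl hm))
      have hc0 : (levels.count (1 + (n : Int)) : Int) = 0 := by
        rw [List.count_eq_zero.mpr hmem]; rfl
      refine ⟨d.insert (1 + (n : Int)) 0, ?_, ?_, ?_⟩
      · simp only [List.foldl_cons, List.foldl_nil, hcl, Bool.false_eq_true, if_false, hlt]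
        rw [PySem.Dict.getD_insert_self, if_neg (by omega)]
        rw [go_fst_succ, show ((n : Int) + 1) = 1 + (n : Int) from by ring, Prod.ext_iff]
        refine ⟨?_, rfl⟩
        rw [hc0, max_eq_left (by omega)]
        ring
      · intro l
        rw [PySem.Dict.getD_insert]
        by_cases hl : l = 1 + (n : Int)
        · rw [if_pos hl, if_pos (by rw [hl]; push_cast; omega), hl, hlt, hc0,
            min_eq_left (by omega)]
        · rw [if_neg hl, hP1 l]
          by_cases hll : 1 ≤ l ∧ l ≤ (n : Int)
          · rw [if_pos hll, if_pos (by push_cast; omega)]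
          · rw [if_neg hll, if_neg (by push_cast; omega)]
      · intro l
        rw [PySem.Dict.contains_insert, Bool.or_eq_true, beq_iff_eq, ← hP2' l]
        tauto

-- invariant for A's second (cascading) loop, running down from level j
theorem loopA2 (cnt : Int → Int) (hcnt : ∀ l, 0 ≤ cnt l) (j : Nat)
    (d : PySem.Dict Int Int) (carry a1 : Int) (hc : 0 ≤ carry)
    (H1 : ∀ l : Int, 1 ≤ l → l ≤ (j : Int) → d.getD l 0 = min (cnt l) (2 ^ (l - 1).toNat))
    (H2 : ∀ l : Int, 1 ≤ l → l ≤ (j : Int) → d.contains l = true)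
    (H3 : (d.contains ((j : Int) + 1) = true → d.getD ((j : Int) + 1) 0 = carry) ∧
          (d.contains ((j : Int) + 1) = false → carry = 0)) :
    ((PySem.List.pyRange (j : Int) 0 (-1)).foldl
        (fun (st : Int × PySem.Dict Int Int) lev =>
          let a1 := st.1
          let d := if st.2.contains lev then st.2 else st.2.insert lev 0
          let children : Int := if d.contains (lev + 1) = false then 0 else d.getD (lev + 1) 0
          let node_needed := PySem.Int.floordiv (children + 1) 2
          if node_needed > d.getD lev 0 then
            (a1 + (node_needed - d.getD lev 0), d.insert lev node_needed)
          else (a1, d))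
        (a1, d)).1
      = a1 + (go cnt j carry).2 := by
  induction j generalizing d carry a1 with
  | zero =>
    rw [PySem.List.pyRange_neg_one_eq_nil (by norm_num)]
    simp [go]
  | succ j ih =>
    push_cast at H1 H2 H3 ⊢
    have hrange : PySem.List.pyRange ((j : Int) + 1) 0 (-1)
        = ((j : Int) + 1) :: PySem.List.pyRange (j : Int) 0 (-1) := by
      rw [PySem.List.pyRange_neg_one_cons (by omega)]
      norm_num
    rw [hrange, List.foldl_cons]
    have hcl : d.contains ((j : Int) + 1) = true := H2 _ (by omega) (by omega)
    have hgd : d.getD ((j : Int) + 1) 0 = min (cnt ((j : Int) + 1)) (2 ^ j) := by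
      rw [H1 ((j : Int) + 1) (by omega) (by omega)]
      congr 2
      omega
    have hneed0 : 0 ≤ ceilHalf carry := ceilHalf_nonneg hc
    have hhav0 : 0 ≤ min (cnt ((j : Int) + 1)) (2 ^ j) := le_min (hcnt _) (by positivity)
    have hfd : PySem.Int.floordiv (carry + 1) 2 = ceilHalf carry := by
      rw [PySem.Int.floordiv_eq_ediv_of_pos (by omega)]; rfl
    have hch : (if d.contains ((j : Int) + 1 + 1) = false then (0 : Int)
        else d.getD ((j : Int) + 1 + 1) 0) = carry := by
      by_cases hb : d.contains ((j : Int) + 1 + 1) = false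
      · rw [if_pos hb]; exact (H3.2 hb).symm
      · rw [if_neg hb]
        exact H3.1 (by revert hb; cases d.contains ((j : Int) + 1 + 1) <;> simp)
    simp only [hcl, if_true, hch, hfd, hgd]
    by_cases hgt : ceilHalf carry > min (cnt ((j : Int) + 1)) (2 ^ j)
    · rw [if_pos hgt]
      rw [ih (d.insert ((j : Int) + 1) (ceilHalf carry)) (ceilHalf carry) _ hneed0 ?_ ?_ ?_]
      · simp only [go]
        rw [max_eq_right (le_of_lt hgt), max_eq_right (by omega)]
        ring
      · intro l h1 h2
        rw [PySem.Dict.getD_insert, if_neg (by omega)]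
        exact H1 l h1 (by omega)
      · intro l h1 h2
        rw [PySem.Dict.contains_insert, Bool.or_eq_true]
        exact Or.inr (H2 l h1 (by omega))
      · constructor
        · intro _
          exact PySem.Dict.getD_insert_self d _ _ 0
        · intro hco
          rw [PySem.Dict.contains_insert] at hco
          simp at hco
    · rw [if_neg hgt]
      rw [ih d (min (cnt ((j : Int) + 1)) (2 ^ j)) a1 hhav0 ?_ ?_ ?_]
      · simp only [go]
        rw [max_eq_left (not_lt.mp hgt), max_eq_left (by omega)]
        ring
      · intro l h1 h2
        exact H1 l h1 (by omega)
      · intro l h1 h2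
        exact H2 l h1 (by omega)
      · exact ⟨fun _ => hgd, fun hco => absurd hcl (by rw [hco]; simp)⟩

-- ===== B-side: the fold over present levels computes the model =====

theorem loopB (cnt : Int → Int) (hcnt : ∀ l, 0 ≤ cnt l) (getDcnt : Int → Int)
    (hgd : ∀ l, cnt l ≠ 0 → getDcnt l = cnt l)
    (ps : List Int) (j : Nat) (rem add carry : Int) (hc : 0 ≤ carry)
    (hdec : ps.Pairwise (· > ·))
    (hmem : ∀ l ∈ ps, 1 ≤ l ∧ l ≤ (j : Int))
    (hsupp : ∀ l : Int, 1 ≤ l → l ≤ (j : Int) → (l ∈ ps ↔ cnt l ≠ 0)) :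
    (let st := ps.foldl
        (fun (st : Int × Int × Int × Int) l =>
          let removed := st.1
          let added := st.2.1
          let p := cascade st.2.2.1 (st.2.2.2 - 1 - l)
          let added := added + p.1
          let carry := p.2
          let need := PySem.Int.floordiv (carry + 1) 2
          let hav := min (getDcnt l) (2 ^ (l - 1).toNat)
          let removed := removed + (getDcnt l - hav)
          if need > hav then (removed, added + (need - hav), need, l)
          else (removed, added, hav, l))
        (rem, add, carry, (j : Int) + 1)
     let q := cascade st.2.2.1 (st.2.2.2 - 1)
     (st.1, st.2.1 + q.1))
      = (rem + (go cnt j carry).1, add + (go cnt j carry).2) := by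
  induction ps generalizing j rem add carry with
  | nil =>
    have hempty : ∀ l : Int, 1 ≤ l → l ≤ (j : Int) → cnt l = 0 := by
      intro l h1 h2
      by_contra hne
      exact absurd ((hsupp l h1 h2).mpr hne) (List.not_mem_nil)
    dsimp only [List.foldl_nil]
    rw [show (j : Int) + 1 - 1 = (j : Int) from by ring]
    rw [cascade_eq hc, go_empty cnt j hempty hc]
    simp
  | cons l rest ih =>
    obtain ⟨hl1, hlj⟩ := hmem l List.mem_cons_self
    have hcntl : cnt l ≠ 0 := (hsupp l hl1 hlj).mp List.mem_cons_self
    have hgdl : getDcnt l = cnt l := hgd l hcntl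
    have hrest_lt : ∀ x ∈ rest, x < l := fun x hx => List.rel_of_pairwise_cons hdec hx
    have hdec' : rest.Pairwise (· > ·) := (List.pairwise_cons.mp hdec).2
    set g : Nat := ((j : Int) + 1 - 1 - l).toNat with hgdef
    have hgj : (g : Int) = (j : Int) - l := by omega
    set k : Nat := (l - 1).toNat with hkdef
    have hk : (k : Int) = l - 1 := by omega
    have hkl : ((k : Int) + 1) = l := by omega
    have hcasc1 := cascade_eq hc ((j : Int) + 1 - 1 - l)
    set c1 : Int := (hcasc carry g).2 with hc1def
    have hc1 : 0 ≤ c1 := hcasc_snd_nonneg hc g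
    have hfd : PySem.Int.floordiv (c1 + 1) 2 = ceilHalf c1 := by
      rw [PySem.Int.floordiv_eq_ediv_of_pos (by omega)]; rfl
    have hout : ∀ x : Int, (j : Int) - (g : Int) < x → x ≤ (j : Int) → cnt x = 0 := by
      intro x hx1 hx2
      have hxl : l < x := by omega
      by_contra hne
      rcases List.mem_cons.mp ((hsupp x (by omega) hx2).mpr hne) with h | h
      · omega
      · have := hrest_lt x h
        omega
    have hsplit := go_split cnt j g (by omega) hout hc
    have hjg : j - g = k + 1 := by omega
    rw [hjg, ← hc1def] at hsplit
    have hmem' : ∀ x ∈ rest, 1 ≤ x ∧ x ≤ (k : Int) := by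
      intro x hx
      have := hrest_lt x hx
      exact ⟨(hmem x (List.mem_cons_of_mem l hx)).1, by omega⟩
    have hsupp' : ∀ x : Int, 1 ≤ x → x ≤ (k : Int) → (x ∈ rest ↔ cnt x ≠ 0) := by
      intro x h1 h2
      constructor
      · intro hx
        exact (hsupp x h1 (by omega)).mp (List.mem_cons_of_mem l hx)
      · intro hne
        rcases List.mem_cons.mp ((hsupp x h1 (by omega)).mpr hne) with h | h
        · omega
        · exact h
    have hhav0 : 0 ≤ min (cnt l) (2 ^ k) := le_min (hcnt l) (by positivity)
    have hrem : cnt l - min (cnt l) (2 ^ k) = max 0 (cnt l - 2 ^ k) := by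
      rcases le_total (cnt l) (2 ^ k) with h | h
      · rw [min_eq_left h, max_eq_left (by omega)]; omega
      · rw [min_eq_right h, max_eq_right (by omega)]
    dsimp only [List.foldl_cons]
    rw [hcasc1, hgdl, hfd, hsplit]
    simp only [go]
    rw [hkl]
    by_cases hbr : ceilHalf c1 > min (cnt l) (2 ^ k)
    · rw [if_pos hbr]
      have ih' := ih k (rem + (cnt l - min (cnt l) (2 ^ k)))
        (add + (hcasc carry g).1 + (ceilHalf c1 - min (cnt l) (2 ^ k)))
        (ceilHalf c1) (ceilHalf_nonneg hc1) hdec' hmem' hsupp'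
      rw [hkl] at ih'
      dsimp only at ih' ⊢
      rw [ih']
      rw [max_eq_right (le_of_lt hbr), ← hrem, max_eq_right (by omega)]
      exact Prod.ext (by ring) (by ring)
    · rw [if_neg hbr]
      have ih' := ih k (rem + (cnt l - min (cnt l) (2 ^ k)))
        (add + (hcasc carry g).1)
        (min (cnt l) (2 ^ k)) hhav0 hdec' hmem' hsupp'
      rw [hkl] at ih'
      dsimp only at ih' ⊢
      rw [ih']
      rw [max_eq_left (not_lt.mp hbr), ← hrem, max_eq_left (by omega)]
      exact Prod.ext (by ring) (by ring)

-- ===== assembling both sides =====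

theorem solution_eq_model (levels : List Int) (h : levels ≠ []) :
    solution levels =
      [(go (fun l => (levels.count l : Int)) ((((PySem.List.max? (PySem.Dict.counter levels).keys (fun k => k)).getD 0)).toNat) 0).1,
       (go (fun l => (levels.count l : Int)) ((((PySem.List.max? (PySem.Dict.counter levels).keys (fun k => k)).getD 0)).toNat) 0).2] := by
  obtain ⟨m, hm⟩ : ∃ m, PySem.List.max? (PySem.Dict.counter levels).keys (fun k => k) = some m := by
    cases hq : PySem.List.max? (PySem.Dict.counter levels).keys (fun k => k) with
    | none =>
      have := (PySem.List.max?_eq_none_iff _ _).mp hq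
      rw [PySem.Dict.keys_counter] at this
      cases levels with
      | nil => exact absurd rfl h
      | cons a t =>
        have ha : a ∈ PySem.Set.ofList (a :: t) := (PySem.Set.mem_ofList _ _).mpr (by simp)
        rw [this] at ha
        exact absurd ha (List.not_mem_nil)
    | some m => exact ⟨m, rfl⟩
  have hmax : ∀ y ∈ levels, y ≤ m := by
    intro y hy
    exact PySem.List.max?_isMax hm y
      (by rw [PySem.Dict.keys_counter, PySem.Set.mem_ofList]; exact hy)
  have hcnt : ∀ l : Int, 0 ≤ (levels.count l : Int) := fun l => Int.natCast_nonneg _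
  unfold solution
  rw [cnt_eq_counter]
  simp only [hm, Option.getD_some]
  by_cases hm0 : m ≤ 0
  · rw [PySem.List.pyRange_one_eq_nil (by omega), PySem.List.pyRange_neg_one_eq_nil (by omega)]
    rw [show m.toNat = 0 from by omega]
    simp [go]
  · obtain ⟨d, hfold, hP1, hP2⟩ := loopA1 levels m.toNat
    have hcast : ((m.toNat : Nat) : Int) = m := by omega
    rw [hcast] at hfold hP1 hP2
    rw [hfold]
    have hnc : (m + 1) ∉ levels := fun hc => by have := hmax _ hc; omega
    have hco : d.contains (m + 1) = false := by
      rcases Bool.eq_false_or_eq_true (d.contains (m + 1)) with hb | hb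
      · rcases (hP2 _).mp hb with h' | h'
        · exact absurd h' hnc
        · omega
      · exact hb
    have h2 := loopA2 (fun l => (levels.count l : Int)) hcnt m.toNat d 0 0 le_rfl
      (fun l h1 h2 => by rw [hP1 l, if_pos ⟨h1, by omega⟩])
      (fun l h1 h2 => (hP2 l).mpr (Or.inr ⟨h1, by omega⟩))
      (by
        rw [hcast]
        exact ⟨fun hct => absurd hct (by rw [hco]; simp), fun _ => rfl⟩)
    rw [hcast] at h2
    rw [h2]
    norm_num

theorem solution_alt_eq_model (levels : List Int) (h : levels ≠ []) :
    solution_alt levels =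
      [(go (fun l => (levels.count l : Int)) ((((PySem.List.max? (PySem.Dict.counter levels).keys (fun k => k)).getD 0)).toNat) 0).1,
       (go (fun l => (levels.count l : Int)) ((((PySem.List.max? (PySem.Dict.counter levels).keys (fun k => k)).getD 0)).toNat) 0).2] := by
  obtain ⟨m, hm⟩ : ∃ m, PySem.List.max? (PySem.Dict.counter levels).keys (fun k => k) = some m := by
    cases hq : PySem.List.max? (PySem.Dict.counter levels).keys (fun k => k) with
    | none =>
      have := (PySem.List.max?_eq_none_iff _ _).mp hq
      rw [PySem.Dict.keys_counter] at this
      cases levels with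
      | nil => exact absurd rfl h
      | cons a t =>
        have ha : a ∈ PySem.Set.ofList (a :: t) := (PySem.Set.mem_ofList _ _).mpr (by simp)
        rw [this] at ha
        exact absurd ha (List.not_mem_nil)
    | some m => exact ⟨m, rfl⟩
  have hmax : ∀ y ∈ levels, y ≤ m := by
    intro y hy
    exact PySem.List.max?_isMax hm y
      (by rw [PySem.Dict.keys_counter, PySem.Set.mem_ofList]; exact hy)
  have hcnt : ∀ l : Int, 0 ≤ (levels.count l : Int) := fun l => Int.natCast_nonneg _
  have hkmem : ∀ x : Int, x ∈ (PySem.Dict.counter levels).keys ↔ x ∈ levels := by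
    intro x
    rw [PySem.Dict.keys_counter, PySem.Set.mem_ofList]
  have hmemf : ∀ x : Int,
      x ∈ (PySem.Dict.counter levels).keys.filter (fun k => k ≥ 1) ↔
        (x ∈ levels ∧ 1 ≤ x) := by
    intro x
    rw [List.mem_filter, hkmem]
    simp
  unfold solution_alt
  rw [PySem.Dict.foldl_insert_getD_add_one_eq_counter]
  simp only [hm, Option.getD_some]
  by_cases hm0 : m ≤ 0
  · have hfe : (PySem.Dict.counter levels).keys.filter (fun k => k ≥ 1) = [] := by
      rw [List.filter_eq_nil_iff]
      intro x hx
      have := hmax x ((hkmem x).mp hx)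
      simp only [decide_eq_true_eq, ge_iff_le]
      omega
    rw [hfe, show PySem.List.sorted ([] : List Int) (fun k => k) true = [] from rfl]
    dsimp only [List.foldl_nil]
    rw [show m + 1 - 1 = m from by ring, show cascade 0 m = (0, 0) from by rw [cascade]; simp [hm0]]
    rw [show m.toNat = 0 from by omega]
    simp [go]
  · -- properties of the descending present-level list
    set ps := PySem.List.sorted ((PySem.Dict.counter levels).keys.filter (fun k => k ≥ 1))
      (fun k => k) true with hps
    have hnodup : ps.Nodup := by
      rw [hps]
      exact ((PySem.List.sorted_perm _ _ _).nodup_iff).mpr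
        ((PySem.Dict.nodup_keys_counter levels).filter _)
    have hge : ps.Pairwise (fun a b => b ≤ a) := PySem.List.sorted_pairwise_rev _ _
    have hdec : ps.Pairwise (· > ·) := by
      have hand := List.Pairwise.and hge hnodup
      exact hand.imp (fun {a b} hab => lt_of_le_of_ne hab.1 (Ne.symm hab.2))
    have hmemps : ∀ x : Int, x ∈ ps ↔ (x ∈ levels ∧ 1 ≤ x) := by
      intro x
      rw [hps, PySem.List.mem_sorted, hmemf]
    have hmem : ∀ x ∈ ps, 1 ≤ x ∧ x ≤ ((m.toNat : Nat) : Int) := by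
      intro x hx
      have h1 := (hmemps x).mp hx
      have := hmax x h1.1
      exact ⟨h1.2, by omega⟩
    have hsupp : ∀ x : Int, 1 ≤ x → x ≤ ((m.toNat : Nat) : Int) → (x ∈ ps ↔ (levels.count x : Int) ≠ 0) := by
      intro x h1 h2
      rw [hmemps]
      constructor
      · intro hx
        have : levels.count x ≠ 0 := by
          rw [Ne, List.count_eq_zero]
          intro hn
          exact hn hx.1
        exact_mod_cast Int.natCast_ne_zero.mpr this
      · intro hne
        have : levels.count x ≠ 0 := by exact_mod_cast Int.natCast_ne_zero.mp (by exact_mod_cast hne)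
        exact ⟨List.count_pos_iff.mp (Nat.pos_of_ne_zero this), h1⟩
    have hb := loopB (fun l => (levels.count l : Int)) hcnt
      (fun l => (PySem.Dict.counter levels).getD l 0)
      (fun l _ => PySem.Dict.getD_counter levels l)
      ps m.toNat 0 0 0 le_rfl hdec hmem hsupp
    have hcast : ((m.toNat : Nat) : Int) = m := by omega
    rw [hcast] at hb
    dsimp only at hb ⊢
    rw [Prod.mk.injEq] at hb
    rw [hb.1, hb.2]
    norm_num

-- ===== VERDICT (by name: the statement is the Claim_ definition above) =====
theorem solution_spec : Claim_equal_solution := by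
  intro levels _ hpre
  unfold Spec_solution
  rw [solution_eq_model levels hpre, solution_alt_eq_model levels hpre]
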